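-- pv_equiv track=rewrite | github.com/ankit160902/3ioNetra | backend/scripts/merge_test_results.py | compute_segments
-- ===== SOURCE A (Python) =====
-- from collections import defaultdict
-- from typing import Any, Dict, List, Optional, Tuple
--
-- ALL_STATUSES = ["PASS", "PARTIAL", "FAIL", "SKIP"]
--
-- def segment_from_id(test_id: str) -> str:
--     """Extract the segment prefix from a test ID.
--
--     Examples:
--         "LLM-02"   -> "LLM"
--         "RAG-14"   -> "RAG"
--         "E2E-01"   -> "E2E"
--         "VOICE-03" -> "VOICE"
--     """
--     parts = test_id.split("-", 1)
--     return parts[0] if parts else "UNKNOWN"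
--
-- def compute_segments(results: List[Dict[str, Any]]) -> Dict[str, Dict[str, int]]:
--     """Build a segment -> {status: count} mapping."""
--     segments: Dict[str, Dict[str, int]] = defaultdict(lambda: {s: 0 for s in ALL_STATUSES})
--     for entry in results:
--         seg = segment_from_id(entry.get("id", ""))
--         status = entry.get("status", "SKIP")
--         if status not in segments[seg]:
--             segments[seg][status] = 0
--         segments[seg][status] += 1
--     return dict(segments)
-- ===== SOURCE B (Python) =====
-- ALL_STATUSES = ["PASS", "PARTIAL", "FAIL", "SKIP"]
--
-- def segment_from_id(test_id: str) -> str: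
--     parts = test_id.split("-", 1)
--     return parts[0] if parts else "UNKNOWN"
--
-- def compute_segments(results):
--     """Build the table directly: list the distinct segments in first-appearance
--     order, then fill each row by counting (segment, status) pairs in a flat
--     pair list -- no incremental accumulator dict is maintained."""
--     pairs = [(segment_from_id(e.get("id", "")), e.get("status", "SKIP")) for e in results]
--     segs = dict.fromkeys(s for s, _ in pairs)
--
--     def row(seg):
--         extras = dict.fromkeys(
--             st for s, st in pairs if s == seg and st not in ALL_STATUSES
--         )
--         return {st: pairs.count((seg, st)) for st in [*ALL_STATUSES, *extras]}
--
--     return {seg: row(seg) for seg in segs}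
-- ===== Notes on version B (the rewrite author's own statement) =====
-- stated objective: alternative
-- what changed: A maintains a mutable nested defaultdict and increments counts entry by entry in one pass; B keeps no running counts at all: it builds the result table directly by comprehension over the distinct segments (first-appearance order), filling each row's count with pairs.count((seg, status)) over a flat pair list.
import Mathlib
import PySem

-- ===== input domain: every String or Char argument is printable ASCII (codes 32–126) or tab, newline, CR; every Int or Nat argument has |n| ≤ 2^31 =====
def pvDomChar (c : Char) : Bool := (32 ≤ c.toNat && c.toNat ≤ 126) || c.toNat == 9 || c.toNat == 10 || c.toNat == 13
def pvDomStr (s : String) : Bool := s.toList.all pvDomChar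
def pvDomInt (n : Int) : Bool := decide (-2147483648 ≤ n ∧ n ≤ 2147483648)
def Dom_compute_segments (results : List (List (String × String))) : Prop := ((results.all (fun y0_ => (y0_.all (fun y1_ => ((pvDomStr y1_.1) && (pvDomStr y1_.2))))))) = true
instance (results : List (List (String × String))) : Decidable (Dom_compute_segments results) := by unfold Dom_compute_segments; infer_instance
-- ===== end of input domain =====

-- B replaces A's single-pass mutable defaultdict accumulation by a direct table construction:
-- distinct segments in first-appearance order, each row filled by counting in a flat pair list
-- (alternative decomposition; not claimed faster).

-- ===== PORT A =====
def ALL_STATUSES : List String := ["PASS", "PARTIAL", "FAIL", "SKIP"]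

-- entry.get(k, dflt) on the association-list model of a dict (first match)

def pyEntryGet (e : List (String × String)) (k dflt : String) : String :=
  match e.find? (fun p => p.1 == k) with
  | some p => p.2
  | none => dflt

def segment_from_id (test_id : String) : String :=
  match PySem.Str.splitMax? test_id "-" 1 with
  | some parts => if parts ≠ [] then parts.headD "UNKNOWN" else "UNKNOWN"
  | none => "UNKNOWN"   -- none is unreachable: separator "-" is nonempty

-- the defaultdict's default factory: {s: 0 for s in ALL_STATUSES}
def freshSeg : PySem.Dict String Int :=
  ALL_STATUSES.foldl (fun d s => d.insert s (0 : Int)) PySem.Dict.empty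

def compute_segments (results : List (List (String × String))) : List (String × List (String × Int)) :=
  let segments : PySem.Dict String (PySem.Dict String Int) :=
    results.foldl (fun segments entry =>
      let seg := segment_from_id (pyEntryGet entry "id" "")
      let status := pyEntryGet entry "status" "SKIP"
      let inner := segments.getD seg freshSeg
      let inner := if inner.contains status then inner else inner.insert status 0
      segments.insert seg (inner.insert status (inner.getD status 0 + 1)))
      PySem.Dict.empty
  segments.items.map (fun p => (p.1, p.2.items))

-- ===== PORT B =====
def compute_segments_alt (results : List (List (String × String))) : List (String × List (String × Int)) :=
  let pairs := results.map (fun e =>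
    (segment_from_id (pyEntryGet e "id" ""), pyEntryGet e "status" "SKIP"))
  let segs := PySem.List.dedup (pairs.map Prod.fst)
  segs.map (fun seg =>
    let extras := PySem.List.dedup
      (((pairs.filter (fun p => p.1 == seg)).map Prod.snd).filter (fun st => !ALL_STATUSES.contains st))
    (seg, (ALL_STATUSES ++ extras).map (fun st => (st, (pairs.count (seg, st) : Int)))))

-- ===== PRECONDITION & SPEC =====
def Spec_compute_segments (results : List (List (String × String))) (out : List (String × List (String × Int))) : Prop := out = compute_segments_alt results
instance (results : List (List (String × String))) (out : List (String × List (String × Int))) : Decidable (Spec_compute_segments results out) := by unfold Spec_compute_segments; infer_instance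

-- ===== CLAIM (what is proved, stated in full; the proofs are below) =====
def Claim_equal_compute_segments : Prop := ∀ (results : List (List (String × String))), Dom_compute_segments results → Spec_compute_segments results (compute_segments results)

-- ===== LEMMAS AND PROOFS =====

-- the (seg, status) pair A extracts from an entry
def pairOf (e : List (String × String)) : String × String :=
  (segment_from_id (pyEntryGet e "id" ""), pyEntryGet e "status" "SKIP")

-- A's loop body, written as a single update on the nested dict at the pair p
def stepF (d : PySem.Dict String (PySem.Dict String Int)) (p : String × String) :
    PySem.Dict String (PySem.Dict String Int) :=
  d.insert p.1 ((d.getD p.1 freshSeg).insert p.2 ((d.getD p.1 freshSeg).getD p.2 0 + 1))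

-- the inner row for segment seg after processing the pair list ps
def rowDict (seg : String) (ps : List (String × String)) : PySem.Dict String Int :=
  ((ps.filter (fun p => p.1 == seg)).map Prod.snd).foldl
    (fun r st => r.insert st (r.getD st 0 + 1)) freshSeg

theorem stepA_eq (d : PySem.Dict String (PySem.Dict String Int)) (seg status : String) :
    d.insert seg
      ((if (d.getD seg freshSeg).contains status then d.getD seg freshSeg
        else (d.getD seg freshSeg).insert status 0).insert status
        ((if (d.getD seg freshSeg).contains status then d.getD seg freshSeg
          else (d.getD seg freshSeg).insert status 0).getD status 0 + 1))
    = stepF d (seg, status) := by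
  simp only [stepF]
  by_cases h : (d.getD seg freshSeg).contains status = true
  · simp [h]
  · have hf : (d.getD seg freshSeg).contains status = false := by simpa using h
    simp only [hf, Bool.false_eq_true, if_false, PySem.Dict.insert_insert_self,
      PySem.Dict.getD_insert_self, PySem.Dict.getD_of_not_contains _ _ hf]

theorem nodup_row_keys (l : List String) :
    (ALL_STATUSES ++ PySem.Set.ofList (l.filter (fun st => !ALL_STATUSES.contains st))).Nodup := by
  rw [List.nodup_append]
  refine ⟨by decide, PySem.Set.nodup_ofList _, ?_⟩
  intro x hx y hy rfl
  have h1 := (PySem.Set.mem_ofList _ _).1 hy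
  have h2 := List.of_mem_filter h1
  simp only [Bool.not_eq_eq_eq_not, Bool.not_true, List.contains_eq_mem, decide_eq_false_iff_not] at h2
  exact h2 hx

-- counting a status inside one segment's pairs = counting the pair in the flat list
theorem count_pair (ps : List (String × String)) (seg st : String) :
    ((ps.filter (fun p => p.1 == seg)).map Prod.snd).count st = ps.count (seg, st) := by
  induction ps with
  | nil => simp
  | cons q ps ih =>
    rcases q with ⟨a, b⟩
    by_cases h : a = seg
    · subst h
      by_cases h2 : b = st <;> simp [h2, ih, Prod.ext_iff]
    · simp [h, ih, Prod.ext_iff]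

-- characterisation of the inner count loop
theorem row_char (sts : List String) :
    ((sts.foldl (fun r st => r.insert st (r.getD st 0 + 1)) freshSeg)).items
      = (ALL_STATUSES ++ PySem.Set.ofList (sts.filter (fun st => !ALL_STATUSES.contains st))).map
          (fun st => (st, (sts.count st : Int))) := by
  induction sts using List.reverseRecOn with
  | nil => decide
  | append_singleton sts t ih =>
    rw [List.foldl_append, List.foldl_cons, List.foldl_nil]
    set D := sts.foldl (fun r st => r.insert st (r.getD st 0 + 1)) freshSeg with hD
    set M := ALL_STATUSES ++ PySem.Set.ofList (sts.filter (fun st => !ALL_STATUSES.contains st)) with hM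
    have hkeys : D.keys = M := by
      show D.items.map Prod.fst = M
      rw [ih, List.map_map]; simp [Function.comp_def]
    have hnd : D.keys.Nodup := by rw [hkeys]; exact nodup_row_keys sts
    by_cases hmem : t ∈ M
    · have hmemit : (t, (sts.count t : Int)) ∈ D.items := by
        rw [ih]; exact List.mem_map_of_mem hmem
      have hget : D.getD t 0 = (sts.count t : Int) :=
        PySem.Dict.getD_of_mem_items _ hmemit hnd 0
      have hcont : D.contains t = true := by
        rw [PySem.Dict.contains_eq_decide_mem_keys, hkeys]; simpa using hmem
      have hfilt : PySem.Set.ofList ((sts ++ [t]).filter (fun st => !ALL_STATUSES.contains st))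
          = PySem.Set.ofList (sts.filter (fun st => !ALL_STATUSES.contains st)) := by
        rw [List.filter_append]
        by_cases hall : t ∈ ALL_STATUSES
        · have : (List.filter (fun st => !ALL_STATUSES.contains st) [t]) = [] := by
            simp [List.filter, hall]
          rw [this, List.append_nil]
        · have : (List.filter (fun st => !ALL_STATUSES.contains st) [t]) = [t] := by
            simp [List.filter, hall]
          rw [this, PySem.Set.ofList_append_singleton, PySem.Set.add_of_mem]
          rw [PySem.Set.mem_ofList]
          have : t ∈ PySem.Set.ofList (sts.filter (fun st => !ALL_STATUSES.contains st)) := by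
            rcases List.mem_append.1 hmem with h | h
            · exact absurd h hall
            · exact h
          exact (PySem.Set.mem_ofList _ _).1 this
      rw [PySem.Dict.items_insert_of_contains _ _ hcont, ih, hget, hfilt, ← hM, List.map_map]
      apply List.map_congr_left
      intro st hst
      by_cases h : st = t
      · subst h
        simp [List.count_append]
      · simp [h, List.count_append, Ne.symm h]
    · have hcont : D.contains t = false := by
        rw [PySem.Dict.contains_eq_decide_mem_keys, hkeys]; simpa using hmem
      have hget : D.getD t 0 = 0 := PySem.Dict.getD_of_not_contains _ _ hcont
      have hall : t ∉ ALL_STATUSES := fun h => hmem (List.mem_append_left _ h)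
      have hsts : t ∉ sts := by
        intro h
        exact hmem (List.mem_append_right _ ((PySem.Set.mem_ofList _ _).2
          (List.mem_filter.2 ⟨h, by simp [hall]⟩)))
      have hfilt : PySem.Set.ofList ((sts ++ [t]).filter (fun st => !ALL_STATUSES.contains st))
          = PySem.Set.ofList (sts.filter (fun st => !ALL_STATUSES.contains st)) ++ [t] := by
        rw [List.filter_append]
        have : (List.filter (fun st => !ALL_STATUSES.contains st) [t]) = [t] := by
          simp [List.filter, hall]
        rw [this, PySem.Set.ofList_append_singleton, PySem.Set.add_of_not_mem]
        rw [PySem.Set.mem_ofList]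
        intro h
        exact hsts (List.mem_filter.1 h).1
      rw [PySem.Dict.items_insert_of_not_contains _ _ hcont, ih, hget, hfilt, ← List.append_assoc, ← hM]
      conv_rhs => rw [List.map_append]
      congr 1
      · apply List.map_congr_left
        intro st hst
        have h : st ≠ t := fun h => hmem (h ▸ hst)
        simp [List.count_append, Ne.symm h]
      · simp [List.count_append, List.count_eq_zero_of_not_mem hsts]

-- characterisation of A's outer loop
theorem fold_char (ps : List (String × String)) :
    (ps.foldl stepF PySem.Dict.empty).items
      = (PySem.Set.ofList (ps.map Prod.fst)).map (fun seg => (seg, rowDict seg ps)) := by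
  induction ps using List.reverseRecOn with
  | nil => decide
  | append_singleton ps p ih =>
    rcases p with ⟨g, t⟩
    rw [List.foldl_append, List.foldl_cons, List.foldl_nil]
    set D := ps.foldl stepF PySem.Dict.empty with hD
    set S := PySem.Set.ofList (ps.map Prod.fst) with hS
    have hkeys : D.keys = S := by
      show D.items.map Prod.fst = S
      rw [ih, List.map_map]; simp [Function.comp_def]
    have hnd : D.keys.Nodup := by rw [hkeys]; exact PySem.Set.nodup_ofList _
    have hrow_ne : ∀ seg, seg ≠ g → rowDict seg (ps ++ [(g, t)]) = rowDict seg ps := by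
      intro seg hne
      unfold rowDict
      rw [List.filter_append]
      have h1 : List.filter (fun p => p.1 == g) [(g,t)] = [(g,t)] := by simp
      have h0 : List.filter (fun p => p.1 == seg) [(g,t)] = [] := by simp [Ne.symm hne]
      rw [h0, List.append_nil]
    have hfirsts : (ps ++ [(g,t)]).map Prod.fst = ps.map Prod.fst ++ [g] := by simp
    simp only [stepF]
    by_cases hmem : g ∈ S
    · have hmemit : (g, rowDict g ps) ∈ D.items := by
        rw [ih]; exact List.mem_map_of_mem hmem
      have hget : D.getD g freshSeg = rowDict g ps :=
        PySem.Dict.getD_of_mem_items _ hmemit hnd _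
      have hcont : D.contains g = true := by
        rw [PySem.Dict.contains_eq_decide_mem_keys, hkeys]; simpa using hmem
      have hrow_g : rowDict g (ps ++ [(g,t)])
          = (rowDict g ps).insert t ((rowDict g ps).getD t 0 + 1) := by
        unfold rowDict
        rw [List.filter_append]
        have h1 : List.filter (fun p => p.1 == g) [(g,t)] = [(g,t)] := by simp
        rw [h1, List.map_append, List.foldl_append]
        rfl
      have hS' : PySem.Set.ofList ((ps ++ [(g,t)]).map Prod.fst) = S := by
        rw [hfirsts, PySem.Set.ofList_append_singleton]
        exact PySem.Set.add_of_mem hmem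
      rw [hget, PySem.Dict.items_insert_of_contains _ _ hcont, ih, hS', List.map_map]
      apply List.map_congr_left
      intro seg hseg
      by_cases h : seg = g
      · subst h; simp [hrow_g]
      · simp [h, hrow_ne seg h]
    · have hcont : D.contains g = false := by
        rw [PySem.Dict.contains_eq_decide_mem_keys, hkeys]; simpa using hmem
      have hget : D.getD g freshSeg = freshSeg :=
        PySem.Dict.getD_of_not_contains _ _ hcont
      have hgs : g ∉ ps.map Prod.fst := by
        intro h
        exact hmem (hS ▸ (PySem.Set.mem_ofList _ _).2 h)
      have hrow_g : rowDict g (ps ++ [(g,t)]) = freshSeg.insert t (freshSeg.getD t 0 + 1) := by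
        unfold rowDict
        have hnil : List.filter (fun p => p.1 == g) ps = [] := by
          rw [List.filter_eq_nil_iff]
          intro q hq
          simp only [beq_iff_eq]
          intro h
          exact hgs (h ▸ List.mem_map_of_mem hq)
        rw [List.filter_append, hnil]
        simp
      have hS' : PySem.Set.ofList ((ps ++ [(g,t)]).map Prod.fst) = S ++ [g] := by
        rw [hfirsts, PySem.Set.ofList_append_singleton, PySem.Set.add_of_not_mem]
        rw [PySem.Set.mem_ofList]
        exact fun h => hgs h
      rw [hget, PySem.Dict.items_insert_of_not_contains _ _ hcont, ih, hS']
      conv_rhs => rw [List.map_append]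
      congr 1
      · apply List.map_congr_left
        intro seg hseg
        have h : seg ≠ g := fun h => hmem (h ▸ hseg)
        rw [hrow_ne seg h]
      · simp [hrow_g]

-- ===== VERDICT (by name: the statement is the Claim_ definition above) =====
theorem compute_segments_spec : Claim_equal_compute_segments := by
  intro results _
  show compute_segments results = compute_segments_alt results
  unfold compute_segments compute_segments_alt
  simp only [stepA_eq]
  rw [show (fun e => (segment_from_id (pyEntryGet e "id" ""), pyEntryGet e "status" "SKIP")) = pairOf from rfl]
  rw [show (fun (segments : PySem.Dict String (PySem.Dict String Int)) (entry : List (String × String)) =>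
        stepF segments (segment_from_id (pyEntryGet entry "id" ""), pyEntryGet entry "status" "SKIP"))
      = (fun d e => stepF d (pairOf e)) from rfl]
  rw [← List.foldl_map]
  rw [fold_char, List.map_map]
  simp only [PySem.List.dedup_eq_ofList]
  apply List.map_congr_left
  intro seg hseg
  simp only [Function.comp_def]
  unfold rowDict
  rw [row_char]
  congr 1
  apply List.map_congr_left
  intro st hst
  rw [count_pair]
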